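-- pv_equiv track=rewrite | github.com/nakamura196/genji | scripts/main/010_createDataV4.py | create_members_map
-- ===== SOURCE A (Python) =====
-- def create_members_map(members_map, members):
--   for member in members:
--     member_id = member["@id"]
--     canvas_id = member_id.split("#")[0]
--     if canvas_id not in members_map:
--       members_map[canvas_id] = []
--     members_map[canvas_id].append(member)
--
--   return members_map
-- ===== SOURCE B (Python) =====
-- def create_members_map(members_map, members):
--     # Group the new members into a fresh dict first, then merge that dict
--     # into members_map per canvas id (mutates members_map like the original).
--     grouped = {}
--     for member in members:
--         cid = member["@id"].split("#")[0]
--         if cid in grouped: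
--             grouped[cid].append(member)
--         else:
--             grouped[cid] = [member]
--     for cid, grp in grouped.items():
--         if cid in members_map:
--             members_map[cid].extend(grp)
--         else:
--             members_map[cid] = grp
--     return members_map
-- ===== Notes on version B (the rewrite author's own statement) =====
-- stated objective: alternative
-- what changed: B first groups the incoming members into a fresh dict in one pass and then merges that grouped dict into members_map key by key (extend existing entries, append new ones), instead of A's per-member update of members_map.
import Mathlib
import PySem

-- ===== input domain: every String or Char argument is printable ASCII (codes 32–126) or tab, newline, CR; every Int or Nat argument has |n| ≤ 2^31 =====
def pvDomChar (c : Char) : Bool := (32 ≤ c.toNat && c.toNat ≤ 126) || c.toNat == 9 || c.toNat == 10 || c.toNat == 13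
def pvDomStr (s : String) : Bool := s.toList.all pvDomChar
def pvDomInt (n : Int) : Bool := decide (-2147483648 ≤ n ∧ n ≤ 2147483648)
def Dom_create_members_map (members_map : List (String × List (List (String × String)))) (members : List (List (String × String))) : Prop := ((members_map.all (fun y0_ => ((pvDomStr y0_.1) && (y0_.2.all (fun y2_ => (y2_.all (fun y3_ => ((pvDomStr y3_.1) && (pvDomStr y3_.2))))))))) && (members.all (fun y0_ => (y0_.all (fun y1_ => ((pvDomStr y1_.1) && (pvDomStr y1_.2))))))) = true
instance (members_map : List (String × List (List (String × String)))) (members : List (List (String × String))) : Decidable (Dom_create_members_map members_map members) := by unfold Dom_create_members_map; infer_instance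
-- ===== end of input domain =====

-- B groups the incoming members into a fresh dict in one pass, then merges that
-- grouped dict into members_map key by key, instead of A's per-member update of
-- members_map (objective: alternative decomposition, same cost).
-- Both Pythons mutate members_map in place; the equivalence proved here is about
-- the RETURN value (which aliases members_map in both).

-- member["@id"].split("#")[0] — "@id" presence is guaranteed by Pre_; split of a
-- nonempty separator never yields an empty list, so headD's default is never used.
def pvCanvasId (member : List (String × String)) : String :=
  (((PySem.Str.split? ((List.lookup "@id" member).getD "") "#").getD []).headD "")

-- members_map[cid].append(member): append to the value of the first entry with key cid
def pvAppendEntry (mm : List (String × List (List (String × String)))) (c : String)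
    (m : List (String × String)) : List (String × List (List (String × String))) :=
  match mm with
  | [] => []
  | (k, vs) :: t => if k = c then (k, vs ++ [m]) :: t else (k, vs) :: pvAppendEntry t c m

-- ===== PORT A =====
def create_members_map (members_map : List (String × List (List (String × String)))) (members : List (List (String × String))) : List (String × List (List (String × String))) :=
  members.foldl (fun mm member =>
    let canvas_id := pvCanvasId member
    let mm := if (List.lookup canvas_id mm).isSome then mm else mm ++ [(canvas_id, [])]
    pvAppendEntry mm canvas_id member) members_map

-- ===== PORT B =====
-- members_map[cid].extend(grp)
def pvExtendEntry (mm : List (String × List (List (String × String)))) (c : String)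
    (grp : List (List (String × String))) : List (String × List (List (String × String))) :=
  match mm with
  | [] => []
  | (k, vs) :: t => if k = c then (k, vs ++ grp) :: t else (k, vs) :: pvExtendEntry t c grp

def create_members_map_alt (members_map : List (String × List (List (String × String)))) (members : List (List (String × String))) : List (String × List (List (String × String))) :=
  let grouped := members.foldl (fun g member =>
    let cid := pvCanvasId member
    if (List.lookup cid g).isSome then pvAppendEntry g cid member
    else g ++ [(cid, [member])]) []
  grouped.foldl (fun mm p =>
    if (List.lookup p.1 mm).isSome then pvExtendEntry mm p.1 p.2
    else mm ++ [p]) members_map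

-- ===== PRECONDITION & SPEC =====
-- Pre_ excludes exactly the inputs where A raises KeyError: a member without an "@id" key.
def Pre_create_members_map (members_map : List (String × List (List (String × String)))) (members : List (List (String × String))) : Prop :=
  ∀ member ∈ members, (List.lookup "@id" member).isSome = true
instance (members_map : List (String × List (List (String × String)))) (members : List (List (String × String))) : Decidable (Pre_create_members_map members_map members) := by unfold Pre_create_members_map; infer_instance

def pvWitness_create_members_map : (List (String × List (List (String × String)))) × (List (List (String × String))) :=
  ([("a", [[("@id", "a#1")]])], [[("@id", "a#2")], [("@id", "b#1")]])

def Spec_create_members_map (members_map : List (String × List (List (String × String)))) (members : List (List (String × String))) (out : List (String × List (List (String × String)))) : Prop := out = create_members_map_alt members_map members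
instance (members_map : List (String × List (List (String × String)))) (members : List (List (String × String))) (out : List (String × List (List (String × String)))) : Decidable (Spec_create_members_map members_map members out) := by unfold Spec_create_members_map; infer_instance

-- ===== CLAIM (what is proved, stated in full; the proofs are below) =====
def Claim_equal_create_members_map : Prop := ∀ (members_map : List (String × List (List (String × String)))) (members : List (List (String × String))), Dom_create_members_map members_map members → Pre_create_members_map members_map members → Spec_create_members_map members_map members (create_members_map members_map members)

-- ===== LEMMAS AND PROOFS =====

-- abbreviations used only by the proofs
abbrev pvMember := List (String × String)
abbrev pvMap := List (String × List pvMember)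

def pvStepG (g : pvMap) (m : pvMember) : pvMap :=
  let c := pvCanvasId m
  if (List.lookup c g).isSome then pvAppendEntry g c m else g ++ [(c, [m])]

def pvMergeStep (mm : pvMap) (p : String × List pvMember) : pvMap :=
  if (List.lookup p.1 mm).isSome then pvExtendEntry mm p.1 p.2 else mm ++ [p]

def pvMerge (mm g : pvMap) : pvMap := g.foldl pvMergeStep mm

theorem lookup_appendEntry_isSome (mm : pvMap) (c k : String) (m : pvMember) :
    (List.lookup k (pvAppendEntry mm c m)).isSome = (List.lookup k mm).isSome := by
  induction mm with
  | nil => rfl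
  | cons hd t ih =>
    obtain ⟨k', vs⟩ := hd
    by_cases hk : k' = c
    · subst hk
      by_cases h2 : (k == k') = true <;> simp [pvAppendEntry, List.lookup, h2]
    · by_cases h2 : (k == k') = true <;> simp [pvAppendEntry, hk, List.lookup, h2, ih]

theorem lookup_extendEntry_isSome (mm : pvMap) (c k : String) (grp : List pvMember) :
    (List.lookup k (pvExtendEntry mm c grp)).isSome = (List.lookup k mm).isSome := by
  induction mm with
  | nil => rfl
  | cons hd t ih =>
    obtain ⟨k', vs⟩ := hd
    by_cases hk : k' = c
    · subst hk
      by_cases h2 : (k == k') = true <;> simp [pvExtendEntry, List.lookup, h2]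
    · by_cases h2 : (k == k') = true <;> simp [pvExtendEntry, hk, List.lookup, h2, ih]

theorem appendEntry_append_single (mm : pvMap) (c k : String) (m : pvMember)
    (w : List pvMember) (h : k ≠ c) :
    pvAppendEntry (mm ++ [(k, w)]) c m = pvAppendEntry mm c m ++ [(k, w)] := by
  induction mm with
  | nil => simp [pvAppendEntry, h]
  | cons hd t ih =>
    obtain ⟨k', vs⟩ := hd
    by_cases hk : k' = c <;> simp [pvAppendEntry, hk, ih]

theorem appendEntry_extendEntry_comm (mm : pvMap) (c k : String) (m : pvMember)
    (w : List pvMember) (h : k ≠ c) :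
    pvAppendEntry (pvExtendEntry mm k w) c m = pvExtendEntry (pvAppendEntry mm c m) k w := by
  induction mm with
  | nil => rfl
  | cons hd t ih =>
    obtain ⟨k', vs⟩ := hd
    by_cases h1 : k' = k <;> by_cases h2 : k' = c
    · exact absurd (h1 ▸ h2) h
    · subst h1; simp [pvExtendEntry, pvAppendEntry, h2]
    · subst h2; simp [pvExtendEntry, pvAppendEntry, h1]
    · simp [pvExtendEntry, pvAppendEntry, h1, h2, ih]

theorem extend_snoc (mm : pvMap) (c : String) (grp : List pvMember) (m : pvMember) :
    pvExtendEntry mm c (grp ++ [m]) = pvAppendEntry (pvExtendEntry mm c grp) c m := by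
  induction mm with
  | nil => rfl
  | cons hd t ih =>
    obtain ⟨k, vs⟩ := hd
    by_cases hk : k = c <;> simp [pvExtendEntry, pvAppendEntry, hk, ih]

theorem extend_single (mm : pvMap) (c : String) (m : pvMember) :
    pvExtendEntry mm c [m] = pvAppendEntry mm c m := by
  induction mm with
  | nil => rfl
  | cons hd t ih =>
    obtain ⟨k, vs⟩ := hd
    by_cases hk : k = c <;> simp [pvExtendEntry, pvAppendEntry, hk, ih]

theorem appendEntry_mergeStep (mm : pvMap) (c : String) (m : pvMember)
    (p : String × List pvMember) (h : p.1 ≠ c) :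
    pvAppendEntry (pvMergeStep mm p) c m = pvMergeStep (pvAppendEntry mm c m) p := by
  unfold pvMergeStep
  rw [lookup_appendEntry_isSome]
  split
  · exact appendEntry_extendEntry_comm mm c p.1 m p.2 h
  · obtain ⟨k, w⟩ := p
    exact appendEntry_append_single mm c k m w h

theorem appendEntry_merge (t : pvMap) (mm : pvMap) (c : String) (m : pvMember)
    (h : List.lookup c t = none) :
    pvAppendEntry (pvMerge mm t) c m = pvMerge (pvAppendEntry mm c m) t := by
  induction t generalizing mm with
  | nil => rfl
  | cons hd t' ih =>
    obtain ⟨k, w⟩ := hd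
    by_cases hk : (c == k) = true
    · simp only [List.lookup, hk] at h; exact absurd h (by simp)
    · simp only [List.lookup, hk] at h
      have hkc : k ≠ c := fun e => by simp [e] at hk
      show pvAppendEntry (pvMerge (pvMergeStep mm (k, w)) t') c m = pvMerge (pvMergeStep (pvAppendEntry mm c m) (k, w)) t'
      rw [ih _ h, appendEntry_mergeStep mm c m (k, w) hkc]

theorem keys_appendEntry (mm : pvMap) (c : String) (m : pvMember) :
    (pvAppendEntry mm c m).map Prod.fst = mm.map Prod.fst := by
  induction mm with
  | nil => rfl
  | cons hd t ih =>
    obtain ⟨k', vs⟩ := hd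
    by_cases hk : k' = c <;> simp [pvAppendEntry, hk, ih]

theorem appendEntry_append_self (mm : pvMap) (c : String) (vs : List pvMember)
    (m : pvMember) (h : List.lookup c mm = none) :
    pvAppendEntry (mm ++ [(c, vs)]) c m = mm ++ [(c, vs ++ [m])] := by
  induction mm with
  | nil => simp [pvAppendEntry]
  | cons hd t ih =>
    obtain ⟨k, w⟩ := hd
    by_cases hk : (c == k) = true
    · simp only [List.lookup, hk] at h; exact absurd h (by simp)
    · simp only [List.lookup, hk] at h
      have hkc : k ≠ c := fun e => by simp [e] at hk
      simp [pvAppendEntry, hkc, ih h]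

theorem lookup_mergeStep_isSome (mm : pvMap) (p : String × List pvMember) (c : String) :
    (List.lookup c (pvMergeStep mm p)).isSome =
      ((List.lookup c mm).isSome || p.1 == c) := by
  unfold pvMergeStep
  split
  · rename_i hs
    rw [lookup_extendEntry_isSome]
    by_cases hc : p.1 = c
    · subst hc; simp [hs]
    · simp [hc]
  · rename_i hs
    simp only [Option.not_isSome_iff_eq_none] at hs
    obtain ⟨k, w⟩ := p
    by_cases hk : (c == k) = true
    · simp [List.lookup_append, List.lookup, hk]
      exact Or.inr (eq_of_beq hk).symm
    · simp [List.lookup_append, List.lookup, hk]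
      intro e
      simp [e] at hk

theorem lookup_merge_mono (t : pvMap) (mm : pvMap) (c : String)
    (h : (List.lookup c mm).isSome = true) :
    (List.lookup c (pvMerge mm t)).isSome = true := by
  induction t generalizing mm with
  | nil => exact h
  | cons hd t' ih =>
    show (List.lookup c (pvMerge (pvMergeStep mm hd) t')).isSome = true
    exact ih _ (by rw [lookup_mergeStep_isSome]; simp [h])

theorem lookup_merge_isSome_left (g : pvMap) (mm : pvMap) (c : String)
    (h : (List.lookup c g).isSome = true) :
    (List.lookup c (pvMerge mm g)).isSome = true := by
  induction g generalizing mm with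
  | nil => simp [List.lookup] at h
  | cons hd t ih =>
    obtain ⟨k, w⟩ := hd
    show (List.lookup c (pvMerge (pvMergeStep mm (k, w)) t)).isSome = true
    by_cases hk : (c == k) = true
    · have hc : k = c := (eq_of_beq hk).symm
      exact lookup_merge_mono t _ c (by rw [lookup_mergeStep_isSome]; simp [hc])
    · simp only [List.lookup, hk] at h
      exact ih _ h

theorem mergeStep_snoc (mm : pvMap) (c : String) (vs : List pvMember) (m : pvMember) :
    pvAppendEntry (pvMergeStep mm (c, vs)) c m = pvMergeStep mm (c, vs ++ [m]) := by
  unfold pvMergeStep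
  simp only
  split
  · exact (extend_snoc mm c vs m).symm
  · rename_i hnone
    simp only [Option.not_isSome_iff_eq_none] at hnone
    exact appendEntry_append_self mm c vs m hnone

-- core commuting lemma
theorem merge_stepG (g : pvMap) (mm : pvMap) (m : pvMember)
    (hnd : (g.map Prod.fst).Nodup) :
    pvMerge mm (pvStepG g m) = pvStepG (pvMerge mm g) m := by
  induction g generalizing mm with
  | nil =>
    show pvMergeStep mm (pvCanvasId m, [m]) = pvStepG mm m
    unfold pvMergeStep pvStepG
    simp only
    split
    · exact extend_single mm (pvCanvasId m) m
    · rfl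
  | cons hd t ih =>
    obtain ⟨k, vs⟩ := hd
    simp only [List.map_cons, List.nodup_cons] at hnd
    obtain ⟨hknot, hndt⟩ := hnd
    by_cases hkc : k = pvCanvasId m
    · subst hkc
      have hct : List.lookup (pvCanvasId m) t = none := by
        rw [List.lookup_eq_none_iff]
        intro p hp
        have : p.1 ∈ t.map Prod.fst := List.mem_map.mpr ⟨p, hp, rfl⟩
        simp only [bne_iff_ne, ne_eq]
        intro e
        exact hknot (e ▸ this)
      have hlg : (List.lookup (pvCanvasId m) ((pvCanvasId m, vs) :: t)).isSome = true := by
        simp [List.lookup]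
      have happ : pvStepG ((pvCanvasId m, vs) :: t) m = (pvCanvasId m, vs ++ [m]) :: t := by
        unfold pvStepG
        simp only [hlg, if_pos]
        simp [pvAppendEntry]
      rw [happ]
      have hrhs : (List.lookup (pvCanvasId m) (pvMerge mm ((pvCanvasId m, vs) :: t))).isSome = true :=
        lookup_merge_isSome_left _ mm _ hlg
      have hr : pvStepG (pvMerge mm ((pvCanvasId m, vs) :: t)) m
          = pvAppendEntry (pvMerge mm ((pvCanvasId m, vs) :: t)) (pvCanvasId m) m := by
        unfold pvStepG
        simp only [hrhs, if_pos]
      rw [hr]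
      show pvMerge (pvMergeStep mm (pvCanvasId m, vs ++ [m])) t
          = pvAppendEntry (pvMerge (pvMergeStep mm (pvCanvasId m, vs)) t) (pvCanvasId m) m
      rw [appendEntry_merge t _ (pvCanvasId m) m hct, mergeStep_snoc]
    · have hl : List.lookup (pvCanvasId m) ((k, vs) :: t) = List.lookup (pvCanvasId m) t := by
        have hkb : (pvCanvasId m == k) = false := by
          simp only [beq_eq_false_iff_ne, ne_eq]
          exact fun e => hkc e.symm
        simp [List.lookup, hkb]
      have hstep : pvStepG ((k, vs) :: t) m = (k, vs) :: pvStepG t m := by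
        unfold pvStepG
        simp only [hl]
        split
        · simp [pvAppendEntry, hkc]
        · simp
      rw [hstep]
      show pvMerge (pvMergeStep mm (k, vs)) (pvStepG t m) = pvStepG (pvMerge (pvMergeStep mm (k, vs)) t) m
      exact ih _ hndt

theorem nodup_stepG (g : pvMap) (m : pvMember) (hnd : (g.map Prod.fst).Nodup) :
    ((pvStepG g m).map Prod.fst).Nodup := by
  unfold pvStepG
  simp only
  split
  · rw [keys_appendEntry]; exact hnd
  · rename_i hnone
    simp only [Option.not_isSome_iff_eq_none] at hnone
    simp only [List.map_append, List.map_cons, List.map_nil]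
    rw [List.nodup_append]
    refine ⟨hnd, List.nodup_singleton _, ?_⟩
    intro a ha b hb
    rw [List.mem_singleton] at hb
    subst hb
    intro e
    subst e
    obtain ⟨⟨k, v⟩, hmem, hfst⟩ := List.mem_map.mp ha
    rw [List.lookup_eq_none_iff] at hnone
    have := hnone (k, v) hmem
    simp only [bne_iff_ne, ne_eq] at this
    exact this hfst.symm

theorem main_lemma (members : List pvMember) (g mm : pvMap)
    (hnd : (g.map Prod.fst).Nodup) :
    pvMerge mm (members.foldl pvStepG g) = members.foldl pvStepG (pvMerge mm g) := by
  induction members generalizing g mm with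
  | nil => rfl
  | cons m rest ih =>
    simp only [List.foldl_cons]
    rw [ih _ _ (nodup_stepG g m hnd), merge_stepG g mm m hnd]

theorem portA_eq (members_map : pvMap) (members : List pvMember) :
    create_members_map members_map members = members.foldl pvStepG members_map := by
  unfold create_members_map
  congr 1
  funext mm m
  simp only
  unfold pvStepG
  simp only
  split
  · rfl
  · rename_i hnone
    simp only [Option.not_isSome_iff_eq_none] at hnone
    exact appendEntry_append_self mm (pvCanvasId m) [] m hnone

theorem portB_eq (members_map : pvMap) (members : List pvMember) :
    create_members_map_alt members_map members = pvMerge members_map (members.foldl pvStepG []) := by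
  rfl

-- ===== VERDICT (by name: the statement is the Claim_ definition above) =====
theorem create_members_map_spec : Claim_equal_create_members_map := by
  intro members_map members _ _
  show create_members_map members_map members = create_members_map_alt members_map members
  rw [portA_eq, portB_eq, main_lemma members [] members_map List.nodup_nil]
  rfl
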